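-- pv_equiv track=rewrite | github.com/TCBarker7892/Farming-Game-Python- | InputProcessing.py | hotbarButtonHandling
-- ===== SOURCE A (Python) =====
-- hotbarButtons = {
--     (350, 450, 590, 690) : 0,
--     (470, 570, 590, 690) : 1,
--     (590, 690, 590, 690) : 2,
--     (710, 810, 590, 690) : 3,
--     (830, 930, 590, 690) : 4,
-- }
--
-- def hotbarButtonHandling(clickXpos, clickYpos, currentSlot):
--     itemChangedBool = False
--     newSlot = currentSlot
--
--     for buttonLocation, hotbarSlot in hotbarButtons.items():
--             if (buttonLocation[0] < clickXpos < buttonLocation[1]) and (buttonLocation[2] < clickYpos < buttonLocation[3]):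
--                 newSlot = hotbarSlot
--                 itemChangedBool = True
--                 break
--
--     return newSlot, itemChangedBool
-- ===== SOURCE B (Python) =====
-- def hotbarButtonHandling(clickXpos, clickYpos, currentSlot):
--     # Grid arithmetic: boxes start at x=350, stride 120, width 100, shared y band.
--     if 590 < clickYpos < 690:
--         i = (clickXpos - 350) // 120
--         if 0 <= i <= 4 and 350 + 120 * i < clickXpos < 450 + 120 * i:
--             return i, True
--     return currentSlot, False
-- ===== Notes on version B (the rewrite author's own statement) =====
-- stated objective: simpler
-- what changed: Replaces the five-box dictionary scan with a direct grid-index formula: one floor division computes the candidate slot, then a single bounds/hit test decides.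
import Mathlib
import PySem

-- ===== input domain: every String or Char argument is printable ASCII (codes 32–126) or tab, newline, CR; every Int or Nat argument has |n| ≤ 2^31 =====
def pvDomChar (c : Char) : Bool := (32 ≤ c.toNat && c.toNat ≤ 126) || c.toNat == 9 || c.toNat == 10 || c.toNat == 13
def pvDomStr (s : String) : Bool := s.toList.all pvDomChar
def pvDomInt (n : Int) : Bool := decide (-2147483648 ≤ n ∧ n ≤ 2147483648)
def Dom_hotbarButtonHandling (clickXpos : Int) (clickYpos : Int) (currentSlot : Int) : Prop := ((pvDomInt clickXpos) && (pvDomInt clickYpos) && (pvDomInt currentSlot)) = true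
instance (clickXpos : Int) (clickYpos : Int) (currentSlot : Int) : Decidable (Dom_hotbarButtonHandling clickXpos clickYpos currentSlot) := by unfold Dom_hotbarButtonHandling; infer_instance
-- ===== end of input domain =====

-- B replaces A's five-box dictionary scan with a direct grid-index formula (objective: simpler).


-- ===== PORT A =====
-- the module-level dict, as an insertion-ordered association list
def hotbarButtons : List ((Int × Int × Int × Int) × Int) :=
  [((350, 450, 590, 690), 0),
   ((470, 570, 590, 690), 1),
   ((590, 690, 590, 690), 2),
   ((710, 810, 590, 690), 3),
   ((830, 930, 590, 690), 4)]

-- the for-loop with break, over the dict's items, carrying (newSlot, itemChangedBool)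
def hotbarLoop (items : List ((Int × Int × Int × Int) × Int)) (clickXpos clickYpos : Int)
    (newSlot : Int) (itemChangedBool : Bool) : Int × Bool :=
  match items with
  | [] => (newSlot, itemChangedBool)
  | (bl, hotbarSlot) :: rest =>
    if bl.1 < clickXpos ∧ clickXpos < bl.2.1 ∧ bl.2.2.1 < clickYpos ∧ clickYpos < bl.2.2.2 then
      (hotbarSlot, true)
    else
      hotbarLoop rest clickXpos clickYpos newSlot itemChangedBool

def hotbarButtonHandling (clickXpos : Int) (clickYpos : Int) (currentSlot : Int) : Int × Bool :=
  hotbarLoop hotbarButtons clickXpos clickYpos currentSlot false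

-- ===== PORT B =====
def hotbarButtonHandling_alt (clickXpos : Int) (clickYpos : Int) (currentSlot : Int) : Int × Bool :=
  if 590 < clickYpos ∧ clickYpos < 690 then
    let i := PySem.Int.floordiv (clickXpos - 350) 120
    if 0 ≤ i ∧ i ≤ 4 ∧ 350 + 120 * i < clickXpos ∧ clickXpos < 450 + 120 * i then
      (i, true)
    else
      (currentSlot, false)
  else
    (currentSlot, false)

-- ===== PRECONDITION & SPEC =====
def Spec_hotbarButtonHandling (clickXpos : Int) (clickYpos : Int) (currentSlot : Int) (out : Int × Bool) : Prop := out = hotbarButtonHandling_alt clickXpos clickYpos currentSlot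
instance (clickXpos : Int) (clickYpos : Int) (currentSlot : Int) (out : Int × Bool) : Decidable (Spec_hotbarButtonHandling clickXpos clickYpos currentSlot out) := by unfold Spec_hotbarButtonHandling; infer_instance

-- ===== CLAIM (what is proved, stated in full; the proofs are below) =====
def Claim_equal_hotbarButtonHandling : Prop := ∀ (clickXpos : Int) (clickYpos : Int) (currentSlot : Int), Dom_hotbarButtonHandling clickXpos clickYpos currentSlot → Spec_hotbarButtonHandling clickXpos clickYpos currentSlot (hotbarButtonHandling clickXpos clickYpos currentSlot)

-- ===== LEMMAS AND PROOFS =====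

-- ===== VERDICT (by name: the statement is the Claim_ definition above) =====
theorem hotbarButtonHandling_spec : Claim_equal_hotbarButtonHandling := by
  intro x y c _
  unfold Spec_hotbarButtonHandling hotbarButtonHandling hotbarButtonHandling_alt hotbarButtons
  rw [PySem.Int.floordiv_eq_ediv_of_pos (by norm_num)]
  simp only [hotbarLoop]
  split_ifs <;>
    first
      | rfl
      | (exfalso; omega)
      | exact Prod.ext_iff.mpr ⟨by omega, rfl⟩
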